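-- pv_equiv track=rewrite | github.com/leethomason/saberCNC | nanopcb.py | scan_isolation
-- ===== SOURCE A (Python) =====
-- ISOLATE = -1
--
-- def scan_isolation(vec):
--     result = []
--
--     x0 = 0
--     while x0 < len(vec):
--         if vec[x0] != ISOLATE:
--             x0 = x0 + 1
--             continue
--         x1 = x0
--         while x1 < len(vec) and vec[x1] == ISOLATE:
--             x1 = x1 + 1
--         if x1 > x0 + 1:
--             result.append(x0)
--             result.append(x1)
--         x0 = x1
--     return result
-- ===== SOURCE B (Python) =====
-- ISOLATE = -1
--
-- def scan_isolation(vec):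
--     n = len(vec)
--     mask = [v == ISOLATE for v in vec]
--     # boundary-flip method: an index i in 0..n is a run boundary iff the
--     # "inside an ISOLATE run" bit flips between positions i-1 and i
--     bounds = [i for i in range(n + 1)
--               if (i < n and mask[i]) != (i > 0 and mask[i - 1])]
--     # boundaries alternate start, end, start, end, ...
--     result = []
--     for s, e in zip(bounds[0::2], bounds[1::2]):
--         if e - s > 1:
--             result += [s, e]
--     return result
-- ===== Notes on version B (the rewrite author's own statement) =====
-- stated objective: alternative
-- what changed: Replaces the two-pointer nested-while run walk with a boundary-flip method: build a boolean ISOLATE mask, collect the indices in 0..n where the mask flips relative to its predecessor, pair the alternating boundaries via strided slices and zip, and keep pairs spanning more than one element.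
import Mathlib
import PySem

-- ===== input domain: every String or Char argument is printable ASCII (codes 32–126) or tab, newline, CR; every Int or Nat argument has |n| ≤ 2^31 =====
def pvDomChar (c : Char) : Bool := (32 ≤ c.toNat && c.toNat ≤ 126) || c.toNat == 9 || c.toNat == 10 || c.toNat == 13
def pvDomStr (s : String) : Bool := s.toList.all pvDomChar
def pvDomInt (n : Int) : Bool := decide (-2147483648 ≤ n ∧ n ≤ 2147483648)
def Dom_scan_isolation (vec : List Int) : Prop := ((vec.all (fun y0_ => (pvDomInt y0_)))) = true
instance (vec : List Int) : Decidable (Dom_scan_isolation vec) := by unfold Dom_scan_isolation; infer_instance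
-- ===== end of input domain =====

-- B replaces A's two-pointer nested-while run walk by a boundary-flip method: a boolean
-- ISOLATE mask, the indices where the mask flips, pairing of alternating boundaries
-- (objective: alternative); same O(n) cost, no speed claim.

-- ===== PORT A =====
-- inner while loop: advance x1 while x1 < len(vec) and vec[x1] == ISOLATE (in-range accesses only)
def aInner (vec : List Int) (x1 : Nat) : Nat :=
  if x1 < vec.length ∧ vec.getD x1 0 = -1 then aInner vec (x1 + 1) else x1
termination_by vec.length - x1
decreasing_by omega

-- termination helpers for the outer loop (cited by decreasing_by below)
theorem aInner_ge (vec : List Int) (x1 : Nat) : x1 ≤ aInner vec x1 := by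
  fun_induction aInner vec x1 with
  | case1 x1 h ih => omega
  | case2 x1 h => omega

theorem aInner_gt (vec : List Int) (x0 : Nat) (h1 : x0 < vec.length)
    (h2 : vec.getD x0 0 = -1) : x0 < aInner vec x0 := by
  rw [aInner, if_pos ⟨h1, h2⟩]
  have := aInner_ge vec (x0 + 1)
  omega

-- outer while loop of A
def aOuter (vec : List Int) (x0 : Nat) (result : List Int) : List Int :=
  if hx : x0 < vec.length then
    if vec.getD x0 0 ≠ -1 then aOuter vec (x0 + 1) result
    else
      let x1 := aInner vec x0
      aOuter vec x1 (if x0 + 1 < x1 then result ++ [(x0 : Int), (x1 : Int)] else result)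
  else result
termination_by vec.length - x0
decreasing_by
  · omega
  · rename_i hval
    have := aInner_gt vec x0 hx (not_not.mp hval)
    omega

def scan_isolation (vec : List Int) : List Int := aOuter vec 0 []

-- ===== PORT B =====
-- hand port of the stride-2 slice bounds[0::2] (elements at even indices; exact)
def bEvens : List Nat → List Nat
  | [] => []
  | [a] => [a]
  | a :: _ :: t => a :: bEvens t

-- hand port of the stride-2 slice bounds[1::2] (elements at odd indices; exact)
def bOdds : List Nat → List Nat
  | [] => []
  | [_] => []
  | _ :: b :: t => b :: bOdds t

def scan_isolation_alt (vec : List Int) : List Int :=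
  let n := vec.length
  let mask := vec.map (fun v => v == (-1 : Int))
  let bounds := (List.range (n + 1)).filter (fun i =>
    (decide (i < n) && mask.getD i false) != (decide (0 < i) && mask.getD (i - 1) false))
  ((bEvens bounds).zip (bOdds bounds)).foldl
    (fun result se =>
      if ((se.2 : Int) - (se.1 : Int)) > 1 then result ++ [(se.1 : Int), (se.2 : Int)]
      else result)
    []

-- ===== PRECONDITION & SPEC =====
def Spec_scan_isolation (vec : List Int) (out : List Int) : Prop := out = scan_isolation_alt vec
instance (vec : List Int) (out : List Int) : Decidable (Spec_scan_isolation vec out) := by unfold Spec_scan_isolation; infer_instance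

-- ===== CLAIM (what is proved, stated in full; the proofs are below) =====
def Claim_equal_scan_isolation : Prop := ∀ (vec : List Int), Dom_scan_isolation vec → Spec_scan_isolation vec (scan_isolation vec)

-- ===== LEMMAS AND PROOFS =====

-- canonical run-based middle form: peel one maximal run per step, track running index
def bGo : List Int → Int → List Int
  | [], _ => []
  | v :: rest, idx =>
    let run := rest.takeWhile (· == v)
    let len : Int := 1 + run.length
    (if v = -1 ∧ 1 < len then [idx, idx + len] else []) ++
      bGo (rest.dropWhile (· == v)) (idx + len)
termination_by l => l.length
decreasing_by
  exact Nat.lt_succ_of_le (List.length_dropWhile_le _ _)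

theorem dropWhile_eq_drop (p : Int → Bool) (l : List Int) :
    l.dropWhile p = l.drop (l.takeWhile p).length := by
  induction l with
  | nil => simp
  | cons a t ih =>
    by_cases h : p a
    · simp [List.takeWhile_cons, List.dropWhile_cons, h, ih]
    · simp [List.takeWhile_cons, List.dropWhile_cons, h]

theorem aInner_eq (vec : List Int) (x0 : Nat) :
    aInner vec x0 = x0 + ((vec.drop x0).takeWhile (· == (-1 : Int))).length := by
  fun_induction aInner vec x0 with
  | case1 x1 h ih =>
    obtain ⟨hlt, hval⟩ := h
    have hd : vec.drop x1 = vec.getD x1 0 :: vec.drop (x1 + 1) := by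
      rw [List.getD_eq_getElem vec 0 hlt, List.drop_eq_getElem_cons hlt]
    rw [hd, hval]
    simp [List.takeWhile_cons, ih]
    omega
  | case2 x1 h =>
    by_cases hlt : x1 < vec.length
    · have hval : vec.getD x1 0 ≠ -1 := by tauto
      have hd : vec.drop x1 = vec.getD x1 0 :: vec.drop (x1 + 1) := by
        rw [List.getD_eq_getElem vec 0 hlt, List.drop_eq_getElem_cons hlt]
      rw [hd, List.takeWhile_cons]
      simp only [show ((vec.getD x1 0) == (-1 : Int)) = false from beq_eq_false_iff_ne.mpr hval]
      simp
    · rw [List.drop_eq_nil_of_le (by omega)]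
      simp

theorem bGo_step (v : Int) (rest : List Int) (idx : Int) (h : v ≠ -1) :
    bGo (v :: rest) idx = bGo rest (idx + 1) := by
  cases rest with
  | nil => simp [bGo, h]
  | cons w rest' =>
    by_cases hw : w = v
    · subst hw
      rw [bGo, bGo]
      simp only [List.takeWhile_cons, List.dropWhile_cons, beq_self_eq_true, if_true,
        h, false_and, if_false, List.nil_append]
      congr 1
      simp only [List.length_cons]
      push_cast
      ring
    · rw [bGo]
      simp only [List.takeWhile_cons, List.dropWhile_cons,
        show (w == v) = false by simp [hw], if_false, List.length_nil, h, false_and,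
        List.nil_append]
      norm_num

theorem a_main_lemma (vec : List Int) :
    ∀ (n x0 : Nat) (res : List Int), vec.length ≤ x0 + n →
      aOuter vec x0 res = res ++ bGo (vec.drop x0) (x0 : Int) := by
  intro n
  induction n with
  | zero =>
    intro x0 res hle
    rw [aOuter, List.drop_eq_nil_of_le (by omega)]
    simp [bGo, dif_neg (by omega : ¬ x0 < vec.length)]
  | succ n ih =>
    intro x0 res hle
    by_cases hx : x0 < vec.length
    · have hd : vec.drop x0 = vec.getD x0 0 :: vec.drop (x0 + 1) := by
        rw [List.getD_eq_getElem vec 0 hx, List.drop_eq_getElem_cons hx]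
      by_cases hval : vec.getD x0 0 = -1
      · -- ISOLATE run starting at x0
        rw [aOuter, dif_pos hx, if_neg (not_not_intro hval)]
        have hinner : aInner vec x0 =
            x0 + 1 + ((vec.drop (x0 + 1)).takeWhile (· == (-1 : Int))).length := by
          rw [aInner_eq, hd, hval]
          simp [List.takeWhile_cons]
          omega
        have hdrop : vec.drop (aInner vec x0) =
            (vec.drop (x0 + 1)).dropWhile (· == (-1 : Int)) := by
          rw [dropWhile_eq_drop, List.drop_drop, hinner]
          try (congr 1; omega)
        rw [ih (aInner vec x0) _ (by have := aInner_gt vec x0 hx hval; omega)]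
        rw [hd, hval, bGo]
        simp only [hdrop]
        have hcast : ((aInner vec x0 : Nat) : Int) =
            (x0 : Int) + (1 + ((vec.drop (x0 + 1)).takeWhile (· == (-1 : Int))).length) := by
          rw [hinner]; push_cast; ring
        by_cases hlen : 1 ≤ ((vec.drop (x0 + 1)).takeWhile (· == (-1 : Int))).length
        · rw [if_pos (by rw [hinner]; omega),
            if_pos (by constructor <;> first | trivial | (push_cast; omega))]
          rw [hcast, List.append_assoc]
        · have h0 : ((vec.drop (x0 + 1)).takeWhile (· == (-1 : Int))).length = 0 := by omega
          rw [if_neg (by rw [hinner]; omega), if_neg (by push_cast; omega)]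
          rw [hcast, List.nil_append]
      · -- non-ISOLATE element: step by one
        rw [aOuter, dif_pos hx, if_pos hval]
        rw [ih (x0 + 1) res (by omega)]
        rw [hd, bGo_step _ _ _ hval]
        norm_cast
    · rw [aOuter, List.drop_eq_nil_of_le (by omega)]
      simp [bGo, dif_neg hx]

-- ---- B side ----

-- generalized boundary list: prev is the mask bit of the (virtual) element before index 0
def bBoundsF (prev : Bool) (l : List Int) : List Nat :=
  (List.range (l.length + 1)).filter (fun i =>
    (decide (i < l.length) && (l.map (fun v => v == (-1 : Int))).getD i false)
      != (if i = 0 then prev else (l.map (fun v => v == (-1 : Int))).getD (i - 1) false))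

theorem bBoundsF_nil (prev : Bool) : bBoundsF prev [] = if prev then [0] else [] := by
  cases prev <;> simp [bBoundsF, List.range_succ, List.filter]

theorem bBoundsF_cons (prev : Bool) (v : Int) (rest : List Int) :
    bBoundsF prev (v :: rest) =
      (if ((v == (-1 : Int)) != prev) then [0] else []) ++
        (bBoundsF (v == (-1 : Int)) rest).map (· + 1) := by
  unfold bBoundsF
  rw [List.range_succ_eq_map]
  rw [List.filter_cons, List.filter_map]
  have hpred : ∀ i : Nat,
      ((fun i => (decide (i < (v :: rest).length) &&
          ((v :: rest).map (fun v => v == (-1 : Int))).getD i false)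
        != (if i = 0 then prev
            else ((v :: rest).map (fun v => v == (-1 : Int))).getD (i - 1) false)) ∘ (· + 1)) i
      = ((decide (i < rest.length) && (rest.map (fun v => v == (-1 : Int))).getD i false)
        != (if i = 0 then (v == (-1 : Int))
            else (rest.map (fun v => v == (-1 : Int))).getD (i - 1) false)) := by
    intro i
    simp only [Function.comp, List.length_cons, List.map_cons]
    congr 1
    · simp [Nat.succ_lt_succ_iff]
    · rcases i with _ | j
      · simp
      · simp only [if_neg (by omega : ¬ (j + 1 + 1 = 0)), if_neg (by omega : ¬ (j + 1 = 0))]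
        simp [List.getD_cons_succ]
  rw [List.filter_congr (fun i _ => hpred i)]
  rcases rest with _ | ⟨w, t⟩
  · simp only [List.length_nil, List.map_cons, List.map_nil]
    cases hv : (v == (-1 : Int)) <;> cases prev <;> simp
  · simp only [List.length_cons, List.map_cons]
    have : (decide (0 < (v :: w :: t).length) &&
        ((v :: w :: t).map (fun v => v == (-1 : Int))).getD 0 false) = (v == (-1 : Int)) := by
      simp
    cases hb : ((v == (-1 : Int)) != prev) <;>
      simp [List.length_cons, hb]

-- boundary list of a list whose virtual predecessor is ISOLATE:
-- first boundary closes the run at its length, rest is the shifted boundaries of the tail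
theorem bBoundsF_true (l : List Int) :
    bBoundsF true l =
      (l.takeWhile (· == (-1 : Int))).length ::
        (bBoundsF false (l.dropWhile (· == (-1 : Int)))).map
          (· + (l.takeWhile (· == (-1 : Int))).length) := by
  induction l with
  | nil => simp [bBoundsF_nil]
  | cons v rest ih =>
    by_cases hv : v = -1
    · subst hv
      rw [bBoundsF_cons]
      simp only [List.takeWhile_cons, List.dropWhile_cons, beq_self_eq_true, if_true,
        bne_self_eq_false, if_false, List.nil_append, ih]
      simp only [List.map_cons, List.map_map, List.length_cons]
      rw [if_neg (by simp), List.nil_append]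
      congr 1
    · have hb : (v == (-1 : Int)) = false := by simp [hv]
      rw [bBoundsF_cons, hb]
      rw [List.takeWhile_cons, List.dropWhile_cons, hb]
      simp [bBoundsF_cons, hb]

theorem bEvens_map (f : Nat → Nat) (l : List Nat) : bEvens (l.map f) = (bEvens l).map f := by
  fun_induction bEvens l with
  | case1 => simp [bEvens]
  | case2 a => simp [bEvens]
  | case3 a b t ih => simp [bEvens, ih]

theorem bOdds_map (f : Nat → Nat) (l : List Nat) : bOdds (l.map f) = (bOdds l).map f := by
  fun_induction bOdds l with
  | case1 => simp [bOdds]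
  | case2 a => simp [bOdds]
  | case3 a b t ih => simp [bOdds, ih]

-- the emission function: B's loop as a flatMap
def bEmit (se : Nat × Nat) : List Int :=
  if ((se.2 : Int) - (se.1 : Int)) > 1 then [(se.1 : Int), (se.2 : Int)] else []

theorem foldl_emit (l : List (Nat × Nat)) (acc : List Int) :
    l.foldl (fun result se =>
      if ((se.2 : Int) - (se.1 : Int)) > 1 then result ++ [(se.1 : Int), (se.2 : Int)]
      else result) acc = acc ++ l.flatMap bEmit := by
  induction l generalizing acc with
  | nil => simp
  | cons p t ih =>
    simp only [List.foldl_cons, List.flatMap_cons, ih, bEmit]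
    split_ifs <;> simp

-- pairing of a shifted boundary list
theorem pairs_map_shift (c : Nat) (l : List Nat) :
    ((bEvens (l.map (· + c))).zip (bOdds (l.map (· + c)))).flatMap bEmit
      = (((bEvens l).zip (bOdds l)).flatMap bEmit).map (· + (c : Int)) := by
  rw [bEvens_map, bOdds_map, List.zip_map]
  rw [List.flatMap_map, List.map_flatMap]
  apply List.flatMap_congr  -- may not exist; fallback below
  intro se _
  simp [bEmit, Prod.map]
  split_ifs with h1 h2 h2 <;> simp_all <;> omega

theorem bGo_shift_aux : ∀ (n : Nat) (l : List Int), l.length ≤ n → ∀ (idx : Int),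
    bGo l idx = (bGo l 0).map (· + idx) := by
  intro n
  induction n with
  | zero =>
    intro l hl idx
    have : l = [] := by cases l <;> simp_all
    subst this
    simp [bGo]
  | succ n ih =>
    intro l hl idx
    rcases l with _ | ⟨v, rest⟩
    · simp [bGo]
    have hle' : (rest.dropWhile (· == v)).length ≤ n :=
      le_trans (List.length_dropWhile_le _ _) (by simpa using Nat.lt_succ_iff.mp (by simpa using hl))
    rw [bGo, bGo]
    simp only [List.map_append]
    rw [ih _ hle' (idx + (1 + ((rest.takeWhile (· == v)).length : Int)))]
    rw [ih _ hle' (0 + (1 + ((rest.takeWhile (· == v)).length : Int)))]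
    simp only [List.map_append, List.map_map]
    congr 1
    · split_ifs <;> simp <;> ring
    · apply List.map_congr_left
      intro x _
      simp only [Function.comp_apply]
      ring

theorem bGo_shift (l : List Int) (idx : Int) :
    bGo l idx = (bGo l 0).map (· + idx) :=
  bGo_shift_aux l.length l (le_refl _) idx

theorem b_main_lemma : ∀ (n : Nat) (l : List Int), l.length ≤ n →
    ((bEvens (bBoundsF false l)).zip (bOdds (bBoundsF false l))).flatMap bEmit = bGo l 0 := by
  intro n
  induction n with
  | zero =>
    intro l hl
    have : l = [] := List.eq_nil_of_length_eq_zero (by omega)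
    subst this
    simp [bBoundsF_nil, bEvens, bOdds, bGo]
  | succ n ih =>
    intro l hl
    rcases l with _ | ⟨v, rest⟩
    · simp [bBoundsF_nil, bEvens, bOdds, bGo]
    by_cases hv : v = -1
    · subst hv
      rw [bBoundsF_cons]
      rw [if_pos (by simp)]
      simp only [show ((-1 : Int) == -1) = true from by decide]
      rw [bBoundsF_true]
      set k := (rest.takeWhile (· == (-1 : Int))).length with hk
      set r := rest.dropWhile (· == (-1 : Int)) with hr
      simp only [List.map_cons, List.map_map, List.cons_append, List.nil_append]
      have hmm : List.map ((fun x => x + 1) ∘ fun x => x + k) (bBoundsF false r)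
          = List.map (fun x => x + (k + 1)) (bBoundsF false r) := by
        apply List.map_congr_left
        intro x _
        simp only [Function.comp_apply]
        omega
      rw [hmm]
      have hzip : ∀ t : List Nat,
          (bEvens (0 :: (k + 1) :: t)).zip (bOdds (0 :: (k + 1) :: t))
            = (0, k + 1) :: (bEvens t).zip (bOdds t) := by
        intro t
        simp [bEvens, bOdds]
      rw [hzip, List.flatMap_cons, pairs_map_shift (k + 1) (bBoundsF false r)]
      have hlen : r.length ≤ n := by
        have h1 : r.length ≤ rest.length := by
          rw [hr]
          exact List.length_dropWhile_le _ _
        simp only [List.length_cons] at hl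
        omega
      rw [ih r hlen, ← bGo_shift]
      rw [bGo, ← hk, ← hr]
      have harg : ((0 : Int) + (1 + (k : Int))) = ((k + 1 : Nat) : Int) := by push_cast; ring
      rw [harg]
      congr 1
      simp only [bEmit]
      split_ifs with h1 h2 h2
      · push_cast
        norm_num
      · exfalso
        push_cast at h1
        exact h2 ⟨by trivial, by omega⟩
      · exfalso
        obtain ⟨-, h2⟩ := h2
        push_cast at h1
        omega
      · rfl
    · rw [bBoundsF_cons]
      have hb : (v == (-1 : Int)) = false := by simp [hv]
      rw [hb]
      rw [if_neg (by simp), List.nil_append]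
      rw [pairs_map_shift 1 (bBoundsF false rest)]
      rw [ih rest (by simpa using Nat.lt_succ_iff.mp (by simpa using hl))]
      rw [bGo_step _ _ _ hv]
      simp only [Nat.cast_one]
      rw [show (0 : Int) + 1 = 1 from by norm_num]
      exact (bGo_shift rest 1).symm

theorem alt_eq_bGo (vec : List Int) : scan_isolation_alt vec = bGo vec 0 := by
  unfold scan_isolation_alt
  rw [foldl_emit]
  simp only [List.nil_append]
  have hb : ((List.range (vec.length + 1)).filter (fun i =>
      (decide (i < vec.length) && (vec.map (fun v => v == (-1 : Int))).getD i false)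
        != (decide (0 < i) && (vec.map (fun v => v == (-1 : Int))).getD (i - 1) false)))
      = bBoundsF false vec := by
    unfold bBoundsF
    apply List.filter_congr
    intro i _
    congr 1
    rcases i with _ | j <;> simp
  rw [hb]
  exact b_main_lemma vec.length vec (le_refl _)

-- ===== VERDICT (by name: the statement is the Claim_ definition above) =====
theorem scan_isolation_spec : Claim_equal_scan_isolation := by
  intro vec _
  unfold Spec_scan_isolation scan_isolation
  rw [a_main_lemma vec vec.length 0 [] (by omega), alt_eq_bGo]
  simp
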